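-- pv_equiv track=rewrite | github.com/Sovik89/Scaler_inter_n_advanced | advanced_dequeue_first_non_repeating_charecter.py | solve
-- ===== SOURCE A (Python) =====
-- from collections import deque
--
-- def solve(A):
--     # @param A : string
--     # @return a strings
--
--     ########################My logic############################execution time:360 ms
--
--         n=len(A)
--
--         # edge case
--
--         if n==0 or n==1:
--             return A
--
--         output_string=""
--
--         freq=dict()
--
--         queue=deque()
--
--         for i in range(n):
--             if A[i] not in freq:
--
--                 freq[A[i]]=1
--                 queue.append(A[i])
--                 output_string+=queue[0]
--             else:
--                 if queue:
--                     if queue[0] == A[i]: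
--                         freq[A[i]]+=1
--                         while queue and freq[queue[0]] >1:
--                             queue.popleft()
--
--                         if not queue:
--                             output_string+="#"
--                         else:
--                             output_string+=queue[0]
--                     else:
--                         freq[A[i]]+=1
--                         output_string+=queue[0]
--                 else:
--                     output_string+="#"
--         return output_string
-- ===== SOURCE B (Python) =====
-- def solve(A):
--     counts = {}
--     order = []
--     out = []
--     for c in A:
--         if c in counts:
--             counts[c] += 1
--         else:
--             counts[c] = 1
--             order.append(c)
--         for ch in order:
--             if counts[ch] == 1:
--                 out.append(ch)
--                 break
--         else:
--             out.append('#')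
--     return ''.join(out)
-- ===== Notes on version B (the rewrite author's own statement) =====
-- stated objective: simpler
-- what changed: Replaces A's maintained deque with its lazy pop-front while-loop and four-way branch by a counts dict plus a first-appearance order list that is rescanned for the first count-1 character at every step; no queue state and no edge-case early return.
import Mathlib
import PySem

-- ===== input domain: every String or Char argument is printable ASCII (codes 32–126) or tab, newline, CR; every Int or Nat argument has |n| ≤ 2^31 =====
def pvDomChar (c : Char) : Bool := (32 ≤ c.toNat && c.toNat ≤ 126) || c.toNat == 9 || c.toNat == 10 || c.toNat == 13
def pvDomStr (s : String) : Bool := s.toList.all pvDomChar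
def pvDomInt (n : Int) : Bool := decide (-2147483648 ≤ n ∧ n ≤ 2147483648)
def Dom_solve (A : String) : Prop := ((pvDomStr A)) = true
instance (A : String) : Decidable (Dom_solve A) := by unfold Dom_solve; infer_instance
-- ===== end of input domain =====

-- B replaces A's deque with lazy pops by a counts dict plus a first-appearance order
-- list rescanned each step for the first count-1 character (simpler; return value only).

-- ===== PORT A =====
-- 'while queue and freq[queue[0]] > 1: queue.popleft()'
def popLoop (freq : PySem.Dict Char Int) : List Char → List Char
  | [] => []
  | q :: qs => if freq.getD q 0 > 1 then popLoop freq qs else q :: qs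

-- one iteration of A's for-loop; state = (output_string, freq, queue)
def stepA (s : List Char × PySem.Dict Char Int × List Char) (c : Char) :
    List Char × PySem.Dict Char Int × List Char :=
  let (out, freq, queue) := s
  if ¬ freq.contains c then
    let freq := freq.insert c 1
    let queue := queue ++ [c]
    (out ++ [queue.headD '#'], freq, queue)   -- queue[0]; queue is nonempty here
  else
    match queue with
    | [] => (out ++ ['#'], freq, queue)
    | q :: qs =>
      if q == c then
        let freq := freq.insert c (freq.getD c 0 + 1)
        match popLoop freq (q :: qs) with
        | [] => (out ++ ['#'], freq, [])
        | q2 :: qs2 => (out ++ [q2], freq, q2 :: qs2)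
      else
        let freq := freq.insert c (freq.getD c 0 + 1)
        (out ++ [q], freq, q :: qs)

def solve (A : String) : String :=
  let n := A.toList.length
  if n == 0 || n == 1 then A
  else String.ofList (A.toList.foldl stepA ([], PySem.Dict.empty, [])).1

-- ===== PORT B =====
-- one iteration of B's loop; state = (out, counts, order)
def stepB (s : List Char × PySem.Dict Char Int × List Char) (c : Char) :
    List Char × PySem.Dict Char Int × List Char :=
  let (out, counts, order) := s
  let counts' := if counts.contains c then counts.insert c (counts.getD c 0 + 1)
                 else counts.insert c 1
  let order' := if counts.contains c then order else order ++ [c]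
  match order'.find? (fun ch => counts'.getD ch 0 == 1) with
  | some ch => (out ++ [ch], counts', order')
  | none => (out ++ ['#'], counts', order')

def solve_alt (A : String) : String :=
  String.ofList (A.toList.foldl stepB ([], PySem.Dict.empty, [])).1

-- ===== PRECONDITION & SPEC =====
def Spec_solve (A : String) (out : String) : Prop := out = solve_alt A
instance (A : String) (out : String) : Decidable (Spec_solve A out) := by unfold Spec_solve; infer_instance

-- ===== CLAIM (what is proved, stated in full; the proofs are below) =====
def Claim_equal_solve : Prop := ∀ (A : String), Dom_solve A → Spec_solve A (solve A)

-- ===== LEMMAS AND PROOFS =====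

theorem popLoop_spec (F : PySem.Dict Char Int) (queue : List Char) :
    ∃ p, queue = p ++ popLoop F queue ∧ ∀ x ∈ p, 2 ≤ F.getD x 0 := by
  induction queue with
  | nil => exact ⟨[], rfl, by simp⟩
  | cons q qs ih =>
    by_cases h : F.getD q 0 > 1
    · obtain ⟨p, hp, hall⟩ := ih
      refine ⟨q :: p, by simp [popLoop, h, ← hp], ?_⟩
      intro x hx
      rcases List.mem_cons.mp hx with rfl | hx
      · omega
      · exact hall x hx
    · exact ⟨[], by simp [popLoop, h], by simp⟩

theorem popLoop_head (F : PySem.Dict Char Int) (queue : List Char) (q : Char) (ys : List Char)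
    (h : popLoop F queue = q :: ys) : F.getD q 0 ≤ 1 := by
  induction queue with
  | nil => simp [popLoop] at h
  | cons a as ih =>
    by_cases h1 : F.getD a 0 > 1
    · exact ih (by simpa [popLoop, h1] using h)
    · rw [popLoop, if_neg h1] at h
      cases h
      omega

theorem find?_prefix_fails (dropped rest : List Char) (p : Char → Bool)
    (h : ∀ d ∈ dropped, p d = false) :
    (dropped ++ rest).find? p = rest.find? p := by
  rw [List.find?_append, List.find?_eq_none.mpr (by intro x hx; simp [h x hx]), Option.none_or]

theorem loop_eq (l : List Char) (out : List Char) (F C : PySem.Dict Char Int)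
    (dropped queue : List Char)
    (hc : ∀ x, F.contains x = C.contains x)
    (hr : ∀ x, F.getD x 0 = C.getD x 0 ∨ (2 ≤ F.getD x 0 ∧ 2 ≤ C.getD x 0))
    (hd : ∀ d ∈ dropped, 2 ≤ C.getD d 0)
    (hq : ∀ q ∈ queue, 1 ≤ F.getD q 0)
    (hh : ∀ q qs, queue = q :: qs → F.getD q 0 = 1)
    (hk : ∀ x, F.contains x = true → 1 ≤ F.getD x 0 ∧ (F.getD x 0 = 1 → x ∈ queue)) :
    (l.foldl stepA (out, F, queue)).1 = (l.foldl stepB (out, C, dropped ++ queue)).1 := by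
  induction l generalizing out F C dropped queue with
  | nil => rfl
  | cons c l ih =>
    -- values =1 transfer between F and C
    have eq1 : ∀ x, F.getD x 0 = 1 → C.getD x 0 = 1 := by
      intro x h1; rcases hr x with h | h <;> omega
    have eqC2 : ∀ x, 2 ≤ F.getD x 0 → 2 ≤ C.getD x 0 := by
      intro x h1; rcases hr x with h | h <;> omega
    rw [List.foldl_cons, List.foldl_cons]
    by_cases hcon : F.contains c = true
    · -- c already seen by A (and by B, since contains agree)
      have hCcon : C.contains c = true := by rw [← hc]; exact hcon
      have hFc1 : 1 ≤ F.getD c 0 := (hk c hcon).1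
      have hCc1 : 1 ≤ C.getD c 0 := by rcases hr c with h | h <;> omega
      have hB : stepB (out, C, dropped ++ queue) c =
          (match (dropped ++ queue).find?
              (fun ch => (C.insert c (C.getD c 0 + 1)).getD ch 0 == 1) with
           | some ch => (out ++ [ch], C.insert c (C.getD c 0 + 1), dropped ++ queue)
           | none => (out ++ ['#'], C.insert c (C.getD c 0 + 1), dropped ++ queue)) := by
        simp [stepB, hCcon]
      match hque : queue with
      | [] =>
        -- A: queue empty, prints '#', freq NOT incremented; B increments counts[c]
        have hFc2 : 2 ≤ F.getD c 0 := by
          rcases (hk c hcon).2 with h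
          by_cases h1 : F.getD c 0 = 1
          · exact absurd (h h1) (by simp [hque])
          · omega
        have hCc2 : 2 ≤ C.getD c 0 := eqC2 c hFc2
        have hA : stepA (out, F, []) c = (out ++ ['#'], F, []) := by
          simp [stepA, hcon]
        rw [hA, hB]
        have hnone : (dropped ++ ([] : List Char)).find?
            (fun ch => (C.insert c (C.getD c 0 + 1)).getD ch 0 == 1) = none := by
          apply List.find?_eq_none.mpr
          intro x hx
          simp only [List.append_nil] at hx
          have := hd x hx
          by_cases hxc : x = c
          · subst hxc; simp [PySem.Dict.getD_insert_self]; omega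
          · simp [PySem.Dict.getD_insert_of_ne _ _ _ hxc]; omega
        rw [hnone]
        apply ih
        · intro x; by_cases hxc : x = c
          · subst hxc; simp [hcon, PySem.Dict.contains_insert, hCcon]
          · simp [PySem.Dict.contains_insert, hc x]
            exact fun he => absurd he hxc
        · intro x; by_cases hxc : x = c
          · subst hxc; right; constructor
            · exact hFc2
            · simp [PySem.Dict.getD_insert_self]; omega
          · rw [PySem.Dict.getD_insert_of_ne _ _ _ hxc]; exact hr x
        · intro d hdm
          by_cases hxc : d = c
          · subst hxc; simp [PySem.Dict.getD_insert_self]; omega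
          · rw [PySem.Dict.getD_insert_of_ne _ _ _ hxc]; exact hd d hdm
        · simp
        · simp
        · intro x hx
          refine ⟨(hk x hx).1, fun h1 => ?_⟩
          have := (hk x hx).2 h1
          simp [hque] at this
      | q :: qs =>
        have hFq1 : F.getD q 0 = 1 := hh q qs rfl
        have hCq1 : C.getD q 0 = 1 := eq1 q hFq1
        by_cases hqc : c = q
        · -- queue front equals c: A increments and pops while count > 1
          subst hqc
          have hA : stepA (out, F, c :: qs) c =
              (match popLoop (F.insert c (F.getD c 0 + 1)) (c :: qs) with
               | [] => (out ++ ['#'], F.insert c (F.getD c 0 + 1), [])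
               | q2 :: qs2 => (out ++ [q2], F.insert c (F.getD c 0 + 1), q2 :: qs2)) := by
            simp [stepA, hcon]
          set F' := F.insert c (F.getD c 0 + 1) with hF'
          set C' := C.insert c (C.getD c 0 + 1) with hC'
          have hF'c : F'.getD c 0 = 2 := by rw [hF', PySem.Dict.getD_insert_self]; omega
          have hC'c : C'.getD c 0 = 2 := by rw [hC', PySem.Dict.getD_insert_self]; omega
          have hF'x : ∀ x, x ≠ c → F'.getD x 0 = F.getD x 0 := fun x hx => by
            rw [hF', PySem.Dict.getD_insert_of_ne _ _ _ hx]
          have hC'x : ∀ x, x ≠ c → C'.getD x 0 = C.getD x 0 := fun x hx => by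
            rw [hC', PySem.Dict.getD_insert_of_ne _ _ _ hx]
          obtain ⟨p, hp, hpall⟩ := popLoop_spec F' (c :: qs)
          have hr' : ∀ x, F'.getD x 0 = C'.getD x 0 ∨ (2 ≤ F'.getD x 0 ∧ 2 ≤ C'.getD x 0) := by
            intro x; by_cases hx : x = c
            · subst hx; right; omega
            · rw [hF'x x hx, hC'x x hx]; exact hr x
          have hd' : ∀ d ∈ dropped ++ p, 2 ≤ C'.getD d 0 := by
            intro d hdm
            rcases List.mem_append.mp hdm with hdm | hdm
            · by_cases hx : d = c
              · subst hx; omega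
              · rw [hC'x d hx]; exact hd d hdm
            · have h2 : 2 ≤ F'.getD d 0 := hpall d hdm
              rcases hr' d with h | h
              · omega
              · omega
          have hc' : ∀ x, F'.contains x = C'.contains x := by
            intro x
            rw [hF', hC', PySem.Dict.contains_insert, PySem.Dict.contains_insert, hc x]
          have hqmem : ∀ x ∈ popLoop F' (c :: qs), x ∈ c :: qs := by
            intro x hx; rw [hp]; exact List.mem_append_right p hx
          have hq' : ∀ x ∈ popLoop F' (c :: qs), 1 ≤ F'.getD x 0 := by
            intro x hx
            by_cases hxq : x = c
            · subst hxq; omega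
            · rw [hF'x x hxq]; exact hq x (hque ▸ hqmem x hx)
          have hk' : ∀ x, F'.contains x = true → 1 ≤ F'.getD x 0 ∧
              (F'.getD x 0 = 1 → x ∈ popLoop F' (c :: qs)) := by
            intro x hx
            by_cases hxq : x = c
            · subst hxq; constructor
              · omega
              · intro h1; omega
            · rw [hF'x x hxq]
              have hxF : F.contains x = true := by
                rw [hF', PySem.Dict.contains_insert] at hx
                simpa [hxq] using hx
              refine ⟨(hk x hxF).1, fun h1 => ?_⟩
              have hxqueue : x ∈ c :: qs := hque ▸ (hk x hxF).2 h1
              rw [hp] at hxqueue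
              rcases List.mem_append.mp hxqueue with hxp | hxres
              · exact absurd (hpall x hxp) (by rw [hF'x x hxq]; omega)
              · exact hxres
          rw [hA, hB]
          match hres : popLoop F' (c :: qs) with
          | [] =>
            have hnone : (dropped ++ c :: qs).find? (fun ch => C'.getD ch 0 == 1) = none := by
              apply List.find?_eq_none.mpr
              intro x hx
              have hx' : x ∈ dropped ++ p := by
                rw [hp, hres, List.append_nil] at hx
                exact hx
              have := hd' x hx'
              simp; omega
            simp only [hnone]
            rw [hp, hres, List.append_nil]
            have hk'' : ∀ x, F'.contains x = true →
                1 ≤ F'.getD x 0 ∧ (F'.getD x 0 = 1 → x ∈ ([] : List Char)) := by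
              intro x hx
              rcases hk' x hx with ⟨h1, h2⟩
              exact ⟨h1, fun he => by simpa [hres] using h2 he⟩
            have h := ih (out ++ ['#']) F' C' (dropped ++ p) [] hc' hr' hd' (by simp) (by simp) hk''
            rw [List.append_nil] at h
            exact h
          | q2 :: qs2 =>
            have hq2mem : q2 ∈ c :: qs := hqmem q2 (by rw [hres]; exact List.mem_cons_self)
            have hq2le : F'.getD q2 0 ≤ 1 := popLoop_head F' (c :: qs) q2 qs2 hres
            have hq2ne : q2 ≠ c := fun he => by rw [he, hF'c] at hq2le; omega
            have hFq2 : F.getD q2 0 = 1 := by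
              have h1 : 1 ≤ F.getD q2 0 := hq q2 (hque ▸ hq2mem)
              have := hF'x q2 hq2ne; omega
            have hCq2 : C'.getD q2 0 = 1 := by
              rw [hC'x q2 hq2ne]; exact eq1 q2 hFq2
            have hfind : (dropped ++ c :: qs).find? (fun ch => C'.getD ch 0 == 1) = some q2 := by
              have hsplit : dropped ++ c :: qs = (dropped ++ p) ++ q2 :: qs2 := by
                rw [List.append_assoc, ← hres, ← hp]
              rw [hsplit, find?_prefix_fails]
              · simp [List.find?, hCq2]
              · intro d hdm; have := hd' d hdm; simp; omega
            simp only [hfind]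
            rw [hp, hres, ← List.append_assoc (as := dropped)]
            apply ih _ _ _ (dropped ++ p) (q2 :: qs2) hc' hr' hd'
            · rw [← hres]; exact hq'
            · intro a as he
              have : F'.getD q2 0 = F.getD q2 0 := hF'x q2 hq2ne
              cases he; omega
            · rw [← hres]; exact hk'
        · -- queue front differs from c: A just increments and prints the front
          have hA : stepA (out, F, q :: qs) c =
              (out ++ [q], F.insert c (F.getD c 0 + 1), q :: qs) := by
            simp [stepA, hcon, Ne.symm hqc, (by simpa using Ne.symm hqc : (q == c) = false)]
          set F' := F.insert c (F.getD c 0 + 1) with hF'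
          set C' := C.insert c (C.getD c 0 + 1) with hC'
          have hF'x : ∀ x, x ≠ c → F'.getD x 0 = F.getD x 0 := fun x hx => by
            rw [hF', PySem.Dict.getD_insert_of_ne _ _ _ hx]
          have hC'x : ∀ x, x ≠ c → C'.getD x 0 = C.getD x 0 := fun x hx => by
            rw [hC', PySem.Dict.getD_insert_of_ne _ _ _ hx]
          have hF'c : F'.getD c 0 = F.getD c 0 + 1 := by rw [hF', PySem.Dict.getD_insert_self]
          have hC'c : C'.getD c 0 = C.getD c 0 + 1 := by rw [hC', PySem.Dict.getD_insert_self]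
          have hfind : (dropped ++ q :: qs).find? (fun ch => C'.getD ch 0 == 1) = some q := by
            rw [find?_prefix_fails]
            · have : C'.getD q 0 = 1 := by rw [hC'x q (Ne.symm hqc)]; exact hCq1
              simp [List.find?, this]
            · intro d hdm
              by_cases hdc : d = c
              · subst hdc; simp; omega
              · have := hd d hdm; rw [hC'x d hdc]; simp; omega
          rw [hA, hB]
          simp only [← hC'] at hfind ⊢
          rw [hfind]
          apply ih
          · intro x
            rw [hF', hC', PySem.Dict.contains_insert, PySem.Dict.contains_insert, hc x]
          · intro x; by_cases hx : x = c
            · subst hx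
              rcases hr x with h | h
              · left; omega
              · right; omega
            · rw [hF'x x hx, hC'x x hx]; exact hr x
          · intro d hdm
            by_cases hdc : d = c
            · subst hdc; have := hd d hdm; omega
            · rw [hC'x d hdc]; exact hd d hdm
          · intro x hx
            by_cases hxc : x = c
            · subst hxc; omega
            · rw [hF'x x hxc]; exact hq x (hque ▸ hx)
          · intro a as he
            cases he
            rw [hF'x q (Ne.symm hqc)]; exact hFq1
          · intro x hx
            by_cases hxc : x = c
            · subst hxc
              refine ⟨by omega, fun h1 => by omega⟩
            · rw [hF'x x hxc]
              have hxF : F.contains x = true := by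
                rw [hF', PySem.Dict.contains_insert] at hx
                simpa [hxc] using hx
              exact ⟨(hk x hxF).1, fun h1 => hque ▸ (hk x hxF).2 h1⟩
    · -- c is new
      have hcon' : F.contains c = false := by simpa using hcon
      have hCcon : C.contains c = false := by rw [← hc]; exact hcon'
      have hFc0 : F.getD c 0 = 0 := PySem.Dict.getD_of_not_contains F 0 hcon'
      have hCc0 : C.getD c 0 = 0 := PySem.Dict.getD_of_not_contains C 0 hCcon
      have hA : stepA (out, F, queue) c =
          (out ++ [(queue ++ [c]).headD '#'], F.insert c 1, queue ++ [c]) := by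
        simp [stepA, hcon']
      set F' := F.insert c 1 with hF'
      set C' := C.insert c 1 with hC'
      have hF'x : ∀ x, x ≠ c → F'.getD x 0 = F.getD x 0 := fun x hx => by
        rw [hF', PySem.Dict.getD_insert_of_ne _ _ _ hx]
      have hC'x : ∀ x, x ≠ c → C'.getD x 0 = C.getD x 0 := fun x hx => by
        rw [hC', PySem.Dict.getD_insert_of_ne _ _ _ hx]
      have hF'c : F'.getD c 0 = 1 := by rw [hF', PySem.Dict.getD_insert_self]
      have hC'c : C'.getD c 0 = 1 := by rw [hC', PySem.Dict.getD_insert_self]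
      have hcne : ∀ d ∈ dropped, d ≠ c := by
        intro d hdm he; subst he; have := hd d hdm; omega
      have hdrop' : ∀ d ∈ dropped, (fun ch => C'.getD ch 0 == 1) d = false := by
        intro d hdm
        have := hd d hdm; simp [hC'x d (hcne d hdm)]; omega
      have hB : stepB (out, C, dropped ++ queue) c =
          (match ((dropped ++ queue) ++ [c]).find? (fun ch => C'.getD ch 0 == 1) with
           | some ch => (out ++ [ch], C', (dropped ++ queue) ++ [c])
           | none => (out ++ ['#'], C', (dropped ++ queue) ++ [c])) := by
        simp [stepB, hCcon, hC']
      -- the head of queue++[c]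
      have hhead : (queue ++ [c]).find? (fun ch => C'.getD ch 0 == 1) =
          some ((queue ++ [c]).headD '#') := by
        match hque : queue with
        | [] => simp [List.find?, hC'c]
        | q :: qs =>
          have hq1 : F.getD q 0 = 1 := hh q qs rfl
          have hqnec : q ≠ c := fun he => by rw [he, hFc0] at hq1; omega
          have : C'.getD q 0 = 1 := by rw [hC'x q hqnec]; exact eq1 q hq1
          simp [List.find?, this]
      have hfind : ((dropped ++ queue) ++ [c]).find? (fun ch => C'.getD ch 0 == 1) =
          some ((queue ++ [c]).headD '#') := by
        rw [List.append_assoc, find?_prefix_fails _ _ _ hdrop', hhead]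
      rw [hA, hB, hfind]
      have : (dropped ++ queue) ++ [c] = dropped ++ (queue ++ [c]) := by
        rw [List.append_assoc]
      rw [this]
      apply ih
      · intro x
        rw [hF', hC', PySem.Dict.contains_insert, PySem.Dict.contains_insert, hc x]
      · intro x; by_cases hx : x = c
        · subst hx; left; omega
        · rw [hF'x x hx, hC'x x hx]; exact hr x
      · intro d hdm
        rw [hC'x d (hcne d hdm)]; exact hd d hdm
      · intro x hx
        rcases List.mem_append.mp hx with hx1 | hx1
        · have h1 := hq x hx1
          have hxne : x ≠ c := by intro he; rw [he, hFc0] at h1; omega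
          rw [hF'x x hxne]; omega
        · simp at hx1; subst hx1; omega
      · intro a as he
        rcases queue with _ | ⟨q, qs⟩
        · simp at he
          rw [← he.1, hF'c]
        · have ha : a = q := by
            have h2 := congrArg (fun l => List.headD l '#') he
            simpa using h2.symm
          subst ha
          have hq1 : F.getD a 0 = 1 := hh a qs rfl
          have hqnec : a ≠ c := fun hxe => by rw [hxe, hFc0] at hq1; omega
          rw [hF'x a hqnec]; exact hq1
      · intro x hx
        by_cases hxc : x = c
        · subst hxc
          exact ⟨by omega, fun _ => List.mem_append_right queue (by simp)⟩
        · rw [hF'x x hxc]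
          have hxF : F.contains x = true := by
            rw [hF', PySem.Dict.contains_insert] at hx
            simpa [hxc] using hx
          exact ⟨(hk x hxF).1, fun h1 => List.mem_append_left [c] ((hk x hxF).2 h1)⟩

theorem solve_eq_alt (A : String) : solve A = solve_alt A := by
  unfold solve solve_alt
  match hl : A.toList with
  | [] =>
    simp only [hl]
    have : A = "" := by
      have := congrArg String.ofList hl
      simpa using this
    simp [this]
  | [c] =>
    simp only [hl]
    have hA : A = String.ofList [c] := by
      have := congrArg String.ofList hl
      simpa using this
    simp only [List.length_cons, List.length_nil]
    rw [if_pos (by decide)]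
    rw [hA]
    congr 1
    simp [stepB, List.find?, PySem.Dict.getD_insert_self]
  | c1 :: c2 :: rest =>
    simp only [hl]
    rw [if_neg (by simp)]
    congr 1
    apply loop_eq _ _ _ _ [] []
    · intro x; rfl
    · intro x; left; rfl
    · simp
    · simp
    · simp
    · intro x hx; simp [PySem.Dict.contains_empty] at hx

-- ===== VERDICT (by name: the statement is the Claim_ definition above) =====
theorem solve_spec : Claim_equal_solve := by
  intro A _
  unfold Spec_solve
  exact solve_eq_alt A
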